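-- pv_equiv track=rewrite | github.com/nirjara-29/phishing-system | backend/app/features/cert_features.py | _domain_matches_san
-- ===== SOURCE A (Python) =====
-- from typing import Any, Dict, List, Optional
--
-- def _domain_matches_san(domain: str, san_list: List[str]) -> bool:
--     """Check if the domain matches any SAN entry (including wildcards)."""
--     domain = domain.lower()
--     for san in san_list:
--         san = san.lower()
--         if domain == san:
--             return True
--         if san.startswith("*."):
--             wildcard_base = san[2:]
--             if domain == wildcard_base or domain.endswith(f".{wildcard_base}"):
--                 return True
--     return False
-- ===== SOURCE B (Python) =====
-- def _domain_matches_san(domain, san_list):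
--     """Check if the domain matches any SAN entry (including wildcards).
--
--     Set-based alternative: one membership probe for the exact name, one for the
--     '*.' + domain pattern, and one per label boundary of the domain,
--     instead of scanning the SAN list entry by entry.
--     """
--     d = domain.lower()
--     sans = {s.lower() for s in san_list}
--     if d in sans:
--         return True
--     if "*." + d in sans:
--         return True
--     for i, ch in enumerate(d):
--         if ch == "." and "*." + d[i + 1:] in sans:
--             return True
--     return False
-- ===== Notes on version B (the rewrite author's own statement) =====
-- stated objective: alternative
-- what changed: Replaces the per-SAN linear scan (equality + wildcard suffix test per entry) with a set of lowercased SANs probed once for the exact domain, once for '*.'+domain, and once per dot boundary of the domain.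
import Mathlib
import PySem

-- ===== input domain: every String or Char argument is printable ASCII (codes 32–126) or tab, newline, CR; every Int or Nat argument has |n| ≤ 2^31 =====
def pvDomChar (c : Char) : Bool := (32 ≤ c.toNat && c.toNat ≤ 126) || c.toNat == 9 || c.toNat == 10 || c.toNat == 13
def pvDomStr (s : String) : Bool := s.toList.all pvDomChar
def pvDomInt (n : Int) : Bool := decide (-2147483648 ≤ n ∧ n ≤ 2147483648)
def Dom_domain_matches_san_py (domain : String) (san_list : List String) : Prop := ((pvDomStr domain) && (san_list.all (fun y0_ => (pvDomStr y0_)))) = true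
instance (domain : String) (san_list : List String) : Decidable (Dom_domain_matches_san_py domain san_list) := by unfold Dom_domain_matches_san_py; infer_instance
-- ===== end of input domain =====

-- B replaces A's per-SAN scan with a set of lowered SANs probed for the exact domain,
-- '*.'+domain, and '*.'+suffix at each dot boundary of the domain (alternative algorithm).

-- ===== PORT A =====
-- the `for san in san_list` loop with early returns (strings handled as List Char via PySem.Chars)
def dmsLoopA (d : List Char) : List String → Bool
  | [] => false
  | san :: rest =>
    let s := PySem.Chars.lower san.toList
    if d = s then true
    else if PySem.Chars.startswith s ['*', '.'] then
      let wildcard_base := PySem.List.slice s (some 2) none   -- san[2:]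
      if d = wildcard_base ∨ PySem.Chars.endswith d ('.' :: wildcard_base) then true
      else dmsLoopA d rest
    else dmsLoopA d rest

def domain_matches_san_py (domain : String) (san_list : List String) : Bool :=
  dmsLoopA (PySem.Chars.lower domain.toList) san_list

-- ===== PORT B =====
-- the `for i, ch in enumerate(d)` loop: at each '.', probe '*.' ++ (suffix after it)
def dmsLoopB (sans : PySem.Set (List Char)) : List Char → Bool
  | [] => false
  | c :: rest =>
    if c = '.' ∧ PySem.Set.contains sans ('*' :: '.' :: rest) then true
    else dmsLoopB sans rest

def domain_matches_san_py_alt (domain : String) (san_list : List String) : Bool :=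
  let d := PySem.Chars.lower domain.toList
  let sans : PySem.Set (List Char) :=
    PySem.Set.ofList (san_list.map (fun s => PySem.Chars.lower s.toList))
  if PySem.Set.contains sans d then true
  else if PySem.Set.contains sans ('*' :: '.' :: d) then true
  else dmsLoopB sans d

-- ===== PRECONDITION & SPEC =====
def Spec_domain_matches_san_py (domain : String) (san_list : List String) (out : Bool) : Prop := out = domain_matches_san_py_alt domain san_list
instance (domain : String) (san_list : List String) (out : Bool) : Decidable (Spec_domain_matches_san_py domain san_list out) := by unfold Spec_domain_matches_san_py; infer_instance

-- ===== CLAIM (what is proved, stated in full; the proofs are below) =====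
def Claim_equal_domain_matches_san_py : Prop := ∀ (domain : String) (san_list : List String), Dom_domain_matches_san_py domain san_list → Spec_domain_matches_san_py domain san_list (domain_matches_san_py domain san_list)

-- ===== LEMMAS AND PROOFS =====

-- the per-SAN condition A's loop body tests, as a Prop
def dmsMatchA (d s : List Char) : Prop :=
  d = s ∨ (PySem.Chars.startswith s ['*', '.'] = true ∧
    (d = PySem.List.slice s (some 2) none ∨
     PySem.Chars.endswith d ('.' :: PySem.List.slice s (some 2) none) = true))

theorem dmsLoopA_iff (d : List Char) (l : List String) :
    dmsLoopA d l = true ↔ ∃ san ∈ l, dmsMatchA d (PySem.Chars.lower san.toList) := by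
  induction l with
  | nil => simp [dmsLoopA]
  | cons san rest ih =>
    simp only [dmsLoopA]
    split_ifs with h1 h2 h3 <;>
      simp_all [dmsMatchA]

theorem dmsContains_iff (xs : List (List Char)) (x : List Char) :
    PySem.Set.contains (PySem.Set.ofList xs) x = true ↔ x ∈ xs := by
  rw [show PySem.Set.contains (PySem.Set.ofList xs) x = true ↔ x ∈ PySem.Set.ofList xs by
        simp [PySem.Set.contains]]
  exact PySem.Set.mem_ofList xs x

theorem dmsLoopB_iff (sans : PySem.Set (List Char)) (d : List Char) :
    dmsLoopB sans d = true ↔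
      ∃ b, (∃ p, d = p ++ '.' :: b) ∧ PySem.Set.contains sans ('*' :: '.' :: b) = true := by
  induction d with
  | nil =>
    simp only [dmsLoopB]
    constructor
    · intro h; exact absurd h (by simp)
    · rintro ⟨b, ⟨p, hp⟩, _⟩; exact absurd hp (by simp)
  | cons c rest ih =>
    simp only [dmsLoopB]
    split_ifs with h
    · obtain ⟨hc, hm⟩ := h
      simp only [true_iff]
      exact ⟨rest, ⟨[], by simp [hc]⟩, hm⟩
    · rw [ih]
      constructor
      · rintro ⟨b, ⟨p, hp⟩, hm⟩
        exact ⟨b, ⟨c :: p, by simp [hp]⟩, hm⟩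
      · rintro ⟨b, ⟨p, hp⟩, hm⟩
        cases p with
        | nil =>
          simp only [List.nil_append, List.cons.injEq] at hp
          exact absurd ⟨hp.1, hp.2 ▸ hm⟩ h
        | cons q p' =>
          simp only [List.cons_append, List.cons.injEq] at hp
          exact ⟨b, ⟨p', hp.2⟩, hm⟩

-- the per-SAN condition, rewritten as: s is one of B's probe keys
theorem dmsMatchA_iff (d s : List Char) :
    dmsMatchA d s ↔
      (s = d ∨ s = '*' :: '.' :: d ∨ ∃ b, (∃ p, d = p ++ '.' :: b) ∧ s = '*' :: '.' :: b) := by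
  unfold dmsMatchA
  by_cases hw : PySem.Chars.startswith s ['*', '.'] = true
  · obtain ⟨t, ht⟩ := (PySem.Chars.startswith_iff s ['*', '.']).mp hw
    subst ht
    simp only [List.cons_append, List.nil_append] at *
    have hdrop : PySem.List.slice ('*' :: '.' :: t) (some 2) none = t := by
      have := PySem.List.slice_from (xs := ('*' :: '.' :: t)) (a := 2) (by norm_num)
      simpa using this
    rw [hdrop]
    have hend := PySem.Chars.endswith_iff d ('.' :: t)
    constructor
    · rintro (h | ⟨-, h | h⟩)
      · exact Or.inl h.symm
      · exact Or.inr (Or.inl (by simp [h]))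
      · obtain ⟨p, hp⟩ := hend.mp h
        exact Or.inr (Or.inr ⟨t, ⟨p, hp.symm⟩, rfl⟩)
    · rintro (h | h | ⟨b, ⟨p, hp⟩, hb⟩)
      · exact Or.inl h.symm
      · simp only [List.cons.injEq] at h
        exact Or.inr ⟨hw, Or.inl h.2.2.symm⟩
      · simp only [List.cons.injEq] at hb
        refine Or.inr ⟨hw, Or.inr (hend.mpr ⟨p, ?_⟩)⟩
        rw [hb.2.2]; exact hp.symm
  · have hs : ∀ t : List Char, s ≠ '*' :: '.' :: t := by
      intro t ht
      exact hw ((PySem.Chars.startswith_iff s ['*', '.']).mpr ⟨t, ht.symm⟩)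
    constructor
    · rintro (h | ⟨h, -⟩)
      · exact Or.inl h.symm
      · exact absurd h hw
    · rintro (h | h | ⟨b, -, hb⟩)
      · exact Or.inl h.symm
      · exact absurd h (hs d)
      · exact absurd hb (hs b)

-- ===== VERDICT (by name: the statement is the Claim_ definition above) =====
theorem domain_matches_san_py_spec : Claim_equal_domain_matches_san_py := by
  intro domain san_list _
  unfold Spec_domain_matches_san_py domain_matches_san_py domain_matches_san_py_alt
  dsimp only
  set d := PySem.Chars.lower domain.toList with hd
  set L := san_list.map (fun s => PySem.Chars.lower s.toList) with hL
  rw [Bool.eq_iff_iff, dmsLoopA_iff]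
  have memL : ∀ x : List Char,
      PySem.Set.contains (PySem.Set.ofList L) x = true ↔ x ∈ L :=
    fun x => dmsContains_iff L x
  constructor
  · rintro ⟨san, hsan, hm⟩
    have hmem : PySem.Chars.lower san.toList ∈ L := by
      exact List.mem_map.mpr ⟨san, hsan, rfl⟩
    rcases (dmsMatchA_iff d _).mp hm with h | h | ⟨b, hb, hkey⟩
    · rw [if_pos ((memL d).mpr (h ▸ hmem))]
    · split_ifs with h1 h2
      · rfl
      · rfl
      · exact absurd ((memL _).mpr (h ▸ hmem)) h2
    · split_ifs with h1 h2
      · rfl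
      · rfl
      · rw [dmsLoopB_iff]
        exact ⟨b, hb, (memL _).mpr (hkey ▸ hmem)⟩
  · intro hB
    split_ifs at hB with h1 h2
    · obtain ⟨san, hsan, hlow⟩ := List.mem_map.mp ((memL d).mp h1)
      exact ⟨san, hsan, (dmsMatchA_iff d _).mpr (Or.inl hlow)⟩
    · obtain ⟨san, hsan, hlow⟩ := List.mem_map.mp ((memL _).mp h2)
      exact ⟨san, hsan, (dmsMatchA_iff d _).mpr (Or.inr (Or.inl hlow))⟩
    · obtain ⟨b, hb, hm⟩ := (dmsLoopB_iff _ d).mp hB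
      obtain ⟨san, hsan, hlow⟩ := List.mem_map.mp ((memL _).mp hm)
      exact ⟨san, hsan, (dmsMatchA_iff d _).mpr (Or.inr (Or.inr ⟨b, hb, hlow⟩))⟩
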